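-- pv_equiv track=rewrite | github.com/CynaraCosta/ray_tracing | versao3/json_reader.py | getting_points
-- ===== SOURCE A (Python) =====
-- def getting_points(lista, data):
--     point_a = []
--     point_b = []
--     point_c = []
--     count = 0
--
--     for point in lista:
--         if count == 0:
--             point_a = point
--             count += 1
--
--         elif count == 1:
--             point_b = point
--             count += 1
--
--         else:
--             point_c = point
--
--     return point_a, point_b, point_c
-- ===== SOURCE B (Python) =====
-- def getting_points(lista, data):
--     n = len(lista)
--     point_a = lista[0] if n >= 1 else []
--     point_b = lista[1] if n >= 2 else []
--     point_c = lista[-1] if n >= 3 else []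
--     return point_a, point_b, point_c
-- ===== Notes on version B (the rewrite author's own statement) =====
-- stated objective: simpler
-- what changed: Replaced the counter-driven loop over the whole list with three guarded direct index accesses (first, second, last) computed from len(lista).
import Mathlib
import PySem

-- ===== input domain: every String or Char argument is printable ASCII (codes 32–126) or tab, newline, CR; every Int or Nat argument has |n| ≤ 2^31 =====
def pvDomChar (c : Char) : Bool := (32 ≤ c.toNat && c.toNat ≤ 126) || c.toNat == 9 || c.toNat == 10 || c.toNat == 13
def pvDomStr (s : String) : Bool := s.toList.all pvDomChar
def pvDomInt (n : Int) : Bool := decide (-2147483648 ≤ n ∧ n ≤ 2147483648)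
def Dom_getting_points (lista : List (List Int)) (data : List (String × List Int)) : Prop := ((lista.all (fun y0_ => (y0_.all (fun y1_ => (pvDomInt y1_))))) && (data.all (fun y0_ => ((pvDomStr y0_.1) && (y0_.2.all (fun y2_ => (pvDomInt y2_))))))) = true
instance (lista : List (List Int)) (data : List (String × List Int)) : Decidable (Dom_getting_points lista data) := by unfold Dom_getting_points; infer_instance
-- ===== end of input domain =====

-- ===== PORT A =====
-- B replaces A's counter-driven scan with three guarded direct index accesses (simpler).
def getting_points (lista : List (List Int)) (data : List (String × List Int)) : List Int × List Int × List Int :=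
  let s := lista.foldl
    (fun (st : List Int × List Int × List Int × Int) point =>
      let (a, b, c, count) := st
      if count = 0 then (point, b, c, count + 1)
      else if count = 1 then (a, point, c, count + 1)
      else (a, b, point, count))
    ([], [], [], 0)
  (s.1, s.2.1, s.2.2.1)

-- ===== PORT B =====
def getting_points_alt (lista : List (List Int)) (data : List (String × List Int)) : List Int × List Int × List Int :=
  let n : Int := lista.length
  let point_a := if n ≥ 1 then (PySem.List.pyGet? lista 0).getD [] else []
  let point_b := if n ≥ 2 then (PySem.List.pyGet? lista 1).getD [] else []
  let point_c := if n ≥ 3 then (PySem.List.pyGet? lista (-1)).getD [] else []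
  (point_a, point_b, point_c)

-- ===== PRECONDITION & SPEC =====
def Spec_getting_points (lista : List (List Int)) (data : List (String × List Int)) (out : List Int × List Int × List Int) : Prop := out = getting_points_alt lista data
instance (lista : List (List Int)) (data : List (String × List Int)) (out : List Int × List Int × List Int) : Decidable (Spec_getting_points lista data out) := by unfold Spec_getting_points; infer_instance

-- ===== CLAIM (what is proved, stated in full; the proofs are below) =====
def Claim_equal_getting_points : Prop := ∀ (lista : List (List Int)) (data : List (String × List Int)), Dom_getting_points lista data → Spec_getting_points lista data (getting_points lista data)

-- ===== LEMMAS AND PROOFS =====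

-- characterise A's fold: after the first two elements, the state keeps count = 2
-- and c tracks the last element seen.
lemma foldA_two (a b c : List Int) (rest : List (List Int)) :
    rest.foldl
      (fun (st : List Int × List Int × List Int × Int) point =>
        let (a, b, c, count) := st
        if count = 0 then (point, b, c, count + 1)
        else if count = 1 then (a, point, c, count + 1)
        else (a, b, point, count))
      (a, b, c, 2)
    = (a, b, rest.getLastD c, 2) := by
  induction rest generalizing c with
  | nil => simp
  | cons x xs ih => rw [List.foldl_cons, List.getLastD_cons]; exact ih x

lemma getElem?_last (xs : List (List Int)) (y : List Int) :
    (y :: xs)[xs.length]? = some (xs.getLastD y) := by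
  induction xs generalizing y with
  | nil => rfl
  | cons z zs ih =>
    rw [List.getLastD_cons, show ((z :: zs).length) = zs.length + 1 from rfl,
        List.getElem?_cons_succ]
    exact ih z

lemma getLastD_pyGet (x y : List Int) (xs : List (List Int)) :
    (PySem.List.pyGet? (x :: y :: xs) (-1)).getD [] = xs.getLastD y := by
  simp only [PySem.List.pyGet?, PySem.List.pyIdx?]
  norm_num
  have h := getElem?_last xs y
  rw [List.getElem?_eq_getElem (by simp)] at h
  rw [Option.some_inj] at h
  simp only [List.getLastD_eq_getLast?] at h
  exact h

lemma foldA_full (x y z : List Int) (xs : List (List Int)) :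
    List.foldl
      (fun (st : List Int × List Int × List Int × Int) point =>
        let (a, b, c, count) := st
        if count = 0 then (point, b, c, count + 1)
        else if count = 1 then (a, point, c, count + 1)
        else (a, b, point, count))
      ([], [], [], 0) (x :: y :: z :: xs)
    = (x, y, xs.getLastD z, 2) := by
  show List.foldl
      (fun (st : List Int × List Int × List Int × Int) point =>
        let (a, b, c, count) := st
        if count = 0 then (point, b, c, count + 1)
        else if count = 1 then (a, point, c, count + 1)
        else (a, b, point, count))
      (x, y, z, 2) xs = _
  exact foldA_two x y z xs

-- ===== VERDICT (by name: the statement is the Claim_ definition above) =====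
theorem getting_points_spec : Claim_equal_getting_points := by
  intro lista data _
  unfold Spec_getting_points getting_points getting_points_alt
  match lista with
  | [] => simp
  | [x] => simp [PySem.List.pyGet?, PySem.List.pyIdx?]
  | [x, y] => simp [PySem.List.pyGet?, PySem.List.pyIdx?]
  | x :: y :: z :: xs =>
    rw [foldA_full, getLastD_pyGet]
    simp only [PySem.List.pyGet?, PySem.List.pyIdx?, List.length_cons]
    norm_num
    split_ifs <;>
      first
        | (exfalso; omega)
        | simp [← List.getLastD_eq_getLast?, List.getLastD_cons]
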